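-- pv_equiv track=rewrite | github.com/std-modelware/polytech-diskrete-2020 | Velichko Arseny/KaprecarMeasurement.py | eraseCycle
-- ===== SOURCE A (Python) =====
-- def eraseCycle(numsList, allUsedNums):
--     cycleList = []
--     cycleBegin = numsList.pop()
--     while numsList[len(numsList) - 1] != cycleBegin:
--         currStr = numsList.pop()
--         allUsedNums[currStr] = 0
--         cycleList.append(currStr)
--     allUsedNums[cycleBegin] = 0
--     cycleList.append(numsList.pop())
--     return cycleList
-- ===== SOURCE B (Python) =====
-- def eraseCycle(numsList, allUsedNums):
--     # Mutates numsList (same truncation as A) and allUsedNums (same keys set to 0).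
--     cycleBegin = numsList.pop()
--     j = len(numsList) - 1 - numsList[::-1].index(cycleBegin)
--     removed = numsList[j:]
--     del numsList[j:]
--     for e in removed:
--         allUsedNums[e] = 0
--     return removed[::-1]
-- ===== Notes on version B (the rewrite author's own statement) =====
-- stated objective: alternative
-- what changed: Replaces the interleaved pop/mark/append while-loop with a two-phase approach: locate the last occurrence of the popped tail element via a reversed-index search, then slice off that suffix at once, mark its elements, and return the reversed slice.
import Mathlib
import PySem

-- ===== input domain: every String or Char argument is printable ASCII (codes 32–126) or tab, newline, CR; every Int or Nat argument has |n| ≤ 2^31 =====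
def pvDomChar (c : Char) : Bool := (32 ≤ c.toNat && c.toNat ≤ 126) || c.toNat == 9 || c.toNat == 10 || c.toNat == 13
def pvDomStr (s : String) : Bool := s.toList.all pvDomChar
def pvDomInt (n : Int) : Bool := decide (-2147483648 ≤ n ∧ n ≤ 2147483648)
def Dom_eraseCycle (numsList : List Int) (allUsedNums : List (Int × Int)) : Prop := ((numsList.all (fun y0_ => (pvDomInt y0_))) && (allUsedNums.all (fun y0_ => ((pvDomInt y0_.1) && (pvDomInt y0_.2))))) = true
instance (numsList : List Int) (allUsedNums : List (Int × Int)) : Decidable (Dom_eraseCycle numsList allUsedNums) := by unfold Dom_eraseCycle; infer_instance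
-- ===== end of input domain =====

-- B replaces A's interleaved pop/mark/append loop by a find-last-occurrence search plus a
-- single slice; equivalence is about the RETURN value only (both Pythons also mutate
-- numsList and allUsedNums identically, which is not modelled here).

-- ===== PORT A =====
-- while numsList[len(numsList)-1] != cycleBegin: currStr = numsList.pop(); allUsedNums[currStr] = 0; cycleList.append(currStr)
-- then: allUsedNums[cycleBegin] = 0; cycleList.append(numsList.pop()).
-- The [] result in the getLast? = none branch stands for Python's IndexError (outside Pre_).
def eraseCycleLoopA (c : Int) (nums : List Int) (d : PySem.Dict Int Int) (cl : List Int) : List Int :=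
  if hn : nums = [] then cl       -- numsList[-1] raises IndexError in Python (outside Pre_)
  else
    let x := nums.getLast hn
    if x = c then
      cl ++ [x]           -- loop exits; allUsedNums[cycleBegin]=0; cycleList.append(pop())
    else
      eraseCycleLoopA c nums.dropLast (d.insert x 0) (cl ++ [x])
termination_by nums.length
decreasing_by
  have := List.length_pos_of_ne_nil hn
  simp [List.length_dropLast]; omega

def eraseCycle (numsList : List Int) (allUsedNums : List (Int × Int)) : List Int :=
  match numsList.getLast? with
  | none => []            -- numsList.pop() raises IndexError in Python (outside Pre_)
  | some c => eraseCycleLoopA c numsList.dropLast (PySem.Dict.ofList allUsedNums) []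

-- ===== PORT B =====
-- cycleBegin = numsList.pop(); j = len-1-numsList[::-1].index(cycleBegin);
-- removed = numsList[j:]; (del numsList[j:]; mark removed — mutations, not modelled); return removed[::-1].
def eraseCycle_alt (numsList : List Int) (allUsedNums : List (Int × Int)) : List Int :=
  match numsList.getLast? with
  | none => []            -- pop() raises IndexError (outside Pre_)
  | some c =>
    let xs := numsList.dropLast
    match PySem.List.index? xs.reverse c with
    | none => []          -- .index raises ValueError (outside Pre_)
    | some k =>
      let j := xs.length - 1 - k   -- nonnegative, so xs[j:] = drop j (exact here)
      (xs.drop j).reverse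

-- ===== PRECONDITION & SPEC =====
-- Pre_ excludes exactly the inputs where A raises IndexError: an empty numsList, or a
-- numsList whose last element does not occur again among the earlier elements.
def Pre_eraseCycle (numsList : List Int) (allUsedNums : List (Int × Int)) : Prop :=
  numsList ≠ [] ∧ numsList.getLast?.getD 0 ∈ numsList.dropLast
instance (numsList : List Int) (allUsedNums : List (Int × Int)) : Decidable (Pre_eraseCycle numsList allUsedNums) := by unfold Pre_eraseCycle; infer_instance
def pvWitness_eraseCycle : List Int × (List (Int × Int)) := ([1, 2, 3, 2], [(1, 1)])

def Spec_eraseCycle (numsList : List Int) (allUsedNums : List (Int × Int)) (out : List Int) : Prop := out = eraseCycle_alt numsList allUsedNums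
instance (numsList : List Int) (allUsedNums : List (Int × Int)) (out : List Int) : Decidable (Spec_eraseCycle numsList allUsedNums out) := by unfold Spec_eraseCycle; infer_instance

-- ===== CLAIM (what is proved, stated in full; the proofs are below) =====
def Claim_equal_eraseCycle : Prop := ∀ (numsList : List Int) (allUsedNums : List (Int × Int)), Dom_eraseCycle numsList allUsedNums → Pre_eraseCycle numsList allUsedNums → Spec_eraseCycle numsList allUsedNums (eraseCycle numsList allUsedNums)

-- ===== LEMMAS AND PROOFS =====

-- B's core value on the tail xs (after the pop), for reasoning.
def altCore (c : Int) (xs : List Int) : List Int :=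
  match PySem.List.index? xs.reverse c with
  | none => []
  | some k => (xs.drop (xs.length - 1 - k)).reverse

theorem loopA_eq_altCore (c : Int) (xs : List Int) (hc : c ∈ xs) :
    ∀ (d : PySem.Dict Int Int) (cl : List Int),
      eraseCycleLoopA c xs d cl = cl ++ altCore c xs := by
  induction xs using List.reverseRecOn with
  | nil => simp at hc
  | append_singleton ys x ih =>
    intro d cl
    rw [eraseCycleLoopA]
    rw [dif_neg (by simp : ys ++ [x] ≠ [])]
    simp only [List.getLast_concat]
    by_cases hx : x = c
    · subst hx
      rw [if_pos rfl]
      simp only [altCore, List.reverse_append, List.reverse_singleton, List.singleton_append,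
        PySem.List.index?_cons_self]
      rw [List.length_append, List.length_singleton]
      simp [List.drop_left']
    · rw [if_neg hx]
      have hcy : c ∈ ys := by
        rcases List.mem_append.mp hc with h | h
        · exact h
        · simp at h; exact absurd h.symm hx
      obtain ⟨k, hk⟩ := Option.isSome_iff_exists.mp
        ((PySem.List.index?_isSome_iff (ys.reverse) c).mpr (by simpa using hcy))
      have hklt : k < ys.length := by
        obtain ⟨hlt, -, -⟩ := PySem.List.getElem_of_index?_eq_some hk
        simpa using hlt
      have halt : altCore c (ys ++ [x]) = x :: altCore c ys := by
        have hne : x ≠ c := hx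
        simp only [altCore, List.reverse_append, List.reverse_singleton, List.singleton_append,
          PySem.List.index?_cons_of_ne ys.reverse hne, hk, Option.map_some]
        have hjle : ys.length - 1 - k ≤ ys.length := by omega
        have hj : (ys ++ [x]).length - 1 - (k + 1) = ys.length - 1 - k := by
          simp; omega
        rw [hj, List.drop_append_of_le_length hjle]
        simp
      rw [List.dropLast_concat, ih hcy, halt]
      simp

theorem eraseCycle_spec : Claim_equal_eraseCycle := by
  unfold Claim_equal_eraseCycle
  intro numsList allUsedNums _ hpre
  unfold Spec_eraseCycle eraseCycle eraseCycle_alt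
  obtain ⟨hne, hmem⟩ := hpre
  obtain ⟨c, hc⟩ := Option.isSome_iff_exists.mp (List.getLast?_isSome.mpr hne)
  have hmem' : c ∈ numsList.dropLast := by rwa [hc] at hmem
  simp only [hc]
  rw [loopA_eq_altCore c numsList.dropLast hmem']
  obtain ⟨k, hk⟩ := Option.isSome_iff_exists.mp
    ((PySem.List.index?_isSome_iff (numsList.dropLast.reverse) c).mpr (by simpa using hmem'))
  simp only [altCore, hk, List.nil_append]
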